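-- pv_equiv track=rewrite | github.com/jack-malik/CRISIL | main.py | get_smallest_val_not_sum_and_not_in_list
-- ===== SOURCE A (Python) =====
-- def get_all_list_elem_combinations(input_list):
--
--     if len(input_list) == 0:
--         return [[]]
--     combinations_list_of_lists = []
--     # loop over all slices of input array starting from second element in the list
--     # recursively and insert into list the list of combinations
--     for tmp_list in get_all_list_elem_combinations(input_list[1:]):
--         # combine
--         combinations_list_of_lists += [tmp_list, tmp_list + [input_list[0]]]
--     return combinations_list_of_lists
--
-- def get_smallest_val_not_sum_and_not_in_list(input_list):
--
--     # Step 1: find all possible combinations of elements in the input list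
--     possible_combinations_list = get_all_list_elem_combinations(input_list)
--
--     # Step 2 - for each combination of elements calculate sum and create list,
--     #          then combine this list with the user input list to create set
--     joined_elem_set = set(  [sum(x) for x in possible_combinations_list] + input_list)
--
--     # Step 3: get MIN and MAX values in the resulting set
--     min_input_val = min(joined_elem_set)
--     max_input_val = max(joined_elem_set)
--
--     # Step 4: Set the initial smallest value to be the max value in set + 1
--     smallest_not_sum_and_not_in_list = max_input_val + 1
--
--     # Step 5: Loop over all values in range(min_input_val, max_input_val).
--     #         If any of the values is smallet than the smallest so far
--     #         reassign the smallest value not an input_list and not a sum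
--     #         of input values
--     for val in range(min_input_val, max_input_val):
--         if val in joined_elem_set:
--             continue
--         if val < smallest_not_sum_and_not_in_list:
--             smallest_not_sum_and_not_in_list = val
--
--     return smallest_not_sum_and_not_in_list
-- ===== SOURCE B (Python) =====
-- def get_smallest_val_not_sum_and_not_in_list(input_list):
--     # DP over achievable subset sums: every list element is itself a singleton
--     # subset sum, so the joined set of A is exactly the set of subset sums.
--     sums = {0}
--     for x in input_list:
--         sums = sums | {s + x for s in sums}
--     lo, hi = min(sums), max(sums)
--     for v in range(lo, hi):
--         if v not in sums:
--             return v
--     return hi + 1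
-- ===== Notes on version B (the rewrite author's own statement) =====
-- stated objective: faster
-- what changed: B replaces A's recursive enumeration of all 2^n element combinations (and the min-tracking scan) with an incremental subset-sum reachability set built in one pass and a direct first-gap scan of range(min,max).
import Mathlib
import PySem

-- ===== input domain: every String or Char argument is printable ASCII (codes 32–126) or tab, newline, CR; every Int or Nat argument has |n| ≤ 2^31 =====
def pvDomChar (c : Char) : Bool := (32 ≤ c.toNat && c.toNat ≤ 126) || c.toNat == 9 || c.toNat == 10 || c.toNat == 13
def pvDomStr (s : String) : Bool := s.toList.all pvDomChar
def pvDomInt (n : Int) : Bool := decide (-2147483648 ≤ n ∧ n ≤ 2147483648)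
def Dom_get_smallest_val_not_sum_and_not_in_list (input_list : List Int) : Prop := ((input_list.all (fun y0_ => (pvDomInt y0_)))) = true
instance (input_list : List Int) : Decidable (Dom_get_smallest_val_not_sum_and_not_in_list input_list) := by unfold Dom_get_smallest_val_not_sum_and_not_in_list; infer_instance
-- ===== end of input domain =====

-- B replaces A's exponential enumeration of all element combinations by an incremental
-- subset-sum reachability set (faster on duplicate-heavy / small-range inputs), then returns
-- the first gap in the ascending scan directly.

-- ===== PORT A =====
-- get_all_list_elem_combinations: recursion on the tail, foldl mirrors the `+=` loop
def pvCombA : List Int → List (List Int)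
  | [] => [[]]
  | x :: rest => (pvCombA rest).foldl (fun acc t => acc ++ [t, t ++ [x]]) []

def get_smallest_val_not_sum_and_not_in_list (input_list : List Int) : Int :=
  let possible := pvCombA input_list
  let joined : PySem.Set Int := PySem.Set.ofList ((possible.map (fun x => x.sum)) ++ input_list)
  -- min/max over the set: joined always contains sum([]) = 0, so Python never raises here
  match PySem.List.min? joined (fun x => x), PySem.List.max? joined (fun x => x) with
  | some mn, some mx =>
      (PySem.List.pyRange mn mx).foldl
        (fun smallest val =>
          if PySem.Set.contains joined val then smallest
          else if val < smallest then val else smallest)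
        (mx + 1)
  | _, _ => 0   -- unreachable (the set is never empty)

-- ===== PORT B =====
def get_smallest_val_not_sum_and_not_in_list_alt (input_list : List Int) : Int :=
  let sums : PySem.Set Int :=
    input_list.foldl
      (fun s x => PySem.Set.union s (s.map (fun t => t + x)))
      (PySem.Set.ofList [0])
  match PySem.List.min? sums (fun x => x) with
  | none => 0   -- unreachable (0 is always a subset sum)
  | some lo =>
    match PySem.List.max? sums (fun x => x) with
    | none => 0
    | some hi =>
      -- `for v in range(lo, hi): if v not in sums: return v` / `return hi + 1`
      match (PySem.List.pyRange lo hi).find? (fun v => !(PySem.Set.contains sums v)) with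
      | some v => v
      | none => hi + 1

-- ===== PRECONDITION & SPEC =====
def Spec_get_smallest_val_not_sum_and_not_in_list (input_list : List Int) (out : Int) : Prop := out = get_smallest_val_not_sum_and_not_in_list_alt input_list
instance (input_list : List Int) (out : Int) : Decidable (Spec_get_smallest_val_not_sum_and_not_in_list input_list out) := by unfold Spec_get_smallest_val_not_sum_and_not_in_list; infer_instance

-- ===== CLAIM (what is proved, stated in full; the proofs are below) =====
def Claim_equal_get_smallest_val_not_sum_and_not_in_list : Prop := ∀ (input_list : List Int), Dom_get_smallest_val_not_sum_and_not_in_list input_list → Spec_get_smallest_val_not_sum_and_not_in_list input_list (get_smallest_val_not_sum_and_not_in_list input_list)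

-- ===== LEMMAS AND PROOFS =====

/-- `SS l a`: `a` is a subset sum of `l`. -/
def SS : List Int → Int → Prop
  | [], a => a = 0
  | x :: r, a => SS r a ∨ SS r (a - x)

theorem SS_zero (l : List Int) : SS l 0 := by
  induction l with
  | nil => rfl
  | cons x r ih => exact Or.inl ih

theorem SS_of_mem {l : List Int} {x : Int} (h : x ∈ l) : SS l x := by
  induction l with
  | nil => cases h
  | cons y r ih =>
    rcases List.mem_cons.mp h with h | h
    · subst h; exact Or.inr (by simpa using SS_zero r)
    · exact Or.inl (ih h)

theorem mem_map_sum_combA (l : List Int) (a : Int) :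
    a ∈ (pvCombA l).map (fun x => x.sum) ↔ SS l a := by
  induction l generalizing a with
  | nil => simp [pvCombA, SS]
  | cons x r ih =>
    simp only [pvCombA, PySem.List.foldl_append_eq_flatMap, List.nil_append]
    constructor
    · intro h
      rcases List.mem_map.mp h with ⟨t, ht, rfl⟩
      rcases List.mem_flatMap.mp ht with ⟨u, hu, hmem⟩
      simp only [List.mem_cons, List.not_mem_nil, or_false] at hmem
      rcases hmem with h1 | h1
      · rw [h1]; exact Or.inl ((ih _).mp (List.mem_map.mpr ⟨u, hu, rfl⟩))
      · rw [h1]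
        refine Or.inr ?_
        have heq : (u ++ [x]).sum - x = u.sum := by simp [List.sum_append]
        rw [heq]
        exact (ih _).mp (List.mem_map.mpr ⟨u, hu, rfl⟩)
    · intro h
      rcases h with h | h
      · rcases List.mem_map.mp ((ih a).mpr h) with ⟨u, hu, rfl⟩
        exact List.mem_map.mpr ⟨u, List.mem_flatMap.mpr ⟨u, hu, by simp⟩, rfl⟩
      · rcases List.mem_map.mp ((ih _).mpr h) with ⟨u, hu, hsum⟩
        refine List.mem_map.mpr ⟨u ++ [x], List.mem_flatMap.mpr ⟨u, hu, by simp⟩, ?_⟩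
        simp only [List.sum_append, List.sum_cons, List.sum_nil]
        omega

theorem mem_foldl_union (l : List Int) (S : PySem.Set Int) (a : Int) :
    a ∈ l.foldl (fun s x => PySem.Set.union s (s.map (fun t => t + x))) S ↔
      ∃ s ∈ S, SS l (a - s) := by
  induction l generalizing S with
  | nil =>
    simp only [List.foldl_nil, SS]
    constructor
    · intro h; exact ⟨a, h, by ring⟩
    · rintro ⟨s, hs, h⟩; have : a = s := by omega
      subst this; exact hs
  | cons x r ih =>
    simp only [List.foldl_cons]
    rw [ih]
    constructor
    · rintro ⟨s, hs, h⟩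
      rcases (PySem.Set.mem_union _ _ _).mp hs with hs | hs
      · exact ⟨s, hs, Or.inl h⟩
      · rcases List.mem_map.mp hs with ⟨t, ht, rfl⟩
        refine ⟨t, ht, Or.inr ?_⟩
        have : a - t - x = a - (t + x) := by ring
        rw [this]; exact h
    · rintro ⟨s, hs, h | h⟩
      · exact ⟨s, (PySem.Set.mem_union _ _ _).mpr (Or.inl hs), h⟩
      · refine ⟨s + x, (PySem.Set.mem_union _ _ _).mpr (Or.inr (List.mem_map.mpr ⟨s, hs, rfl⟩)), ?_⟩
        have : a - (s + x) = a - s - x := by ring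
        rw [this]; exact h

/-- Membership in A's joined set and in B's DP set agree: both are the subset sums. -/
theorem memA_iff_SS (l : List Int) (a : Int) :
    a ∈ PySem.Set.ofList ((pvCombA l).map (fun x => x.sum) ++ l) ↔ SS l a := by
  rw [PySem.Set.mem_ofList, List.mem_append, mem_map_sum_combA]
  constructor
  · rintro (h | h)
    · exact h
    · exact SS_of_mem h
  · exact Or.inl

theorem memB_iff_SS (l : List Int) (a : Int) :
    a ∈ l.foldl (fun s x => PySem.Set.union s (s.map (fun t => t + x)))
          (PySem.Set.ofList [0]) ↔ SS l a := by
  rw [mem_foldl_union]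
  constructor
  · rintro ⟨s, hs, h⟩
    have : s = 0 := by simpa [PySem.Set.mem_ofList] using hs
    subst this; simpa using h
  · intro h
    exact ⟨0, by simp [PySem.Set.mem_ofList], by simpa using h⟩

theorem min?_eq_of_mem_iff {s t : List Int} (h : ∀ a, a ∈ s ↔ a ∈ t) :
    PySem.List.min? s (fun x => x) = PySem.List.min? t (fun x => x) := by
  cases hs : PySem.List.min? s (fun x => x) with
  | none =>
    have : s = [] := (PySem.List.min?_eq_none_iff _ _).mp hs
    subst this
    cases ht : PySem.List.min? t (fun x => x) with
    | none => rfl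
    | some m =>
      exact absurd ((h m).mpr (PySem.List.min?_mem ht)) (by simp)
  | some m =>
    cases ht : PySem.List.min? t (fun x => x) with
    | none =>
      have : t = [] := (PySem.List.min?_eq_none_iff _ _).mp ht
      subst this
      exact absurd ((h m).mp (PySem.List.min?_mem hs)) (by simp)
    | some m' =>
      have h1 := PySem.List.min?_isMin ht m ((h m).mp (PySem.List.min?_mem hs))
      have h2 := PySem.List.min?_isMin hs m' ((h m').mpr (PySem.List.min?_mem ht))
      simp only at h1 h2
      have : m = m' := le_antisymm h2 h1
      rw [this]

theorem max?_eq_of_mem_iff {s t : List Int} (h : ∀ a, a ∈ s ↔ a ∈ t) :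
    PySem.List.max? s (fun x => x) = PySem.List.max? t (fun x => x) := by
  cases hs : PySem.List.max? s (fun x => x) with
  | none =>
    have : s = [] := (PySem.List.max?_eq_none_iff _ _).mp hs
    subst this
    cases ht : PySem.List.max? t (fun x => x) with
    | none => rfl
    | some m =>
      exact absurd ((h m).mpr (PySem.List.max?_mem ht)) (by simp)
  | some m =>
    cases ht : PySem.List.max? t (fun x => x) with
    | none =>
      have : t = [] := (PySem.List.max?_eq_none_iff _ _).mp ht
      subst this
      exact absurd ((h m).mp (PySem.List.max?_mem hs)) (by simp)
    | some m' =>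
      have h1 := PySem.List.max?_isMax ht m ((h m).mp (PySem.List.max?_mem hs))
      have h2 := PySem.List.max?_isMax hs m' ((h m').mpr (PySem.List.max?_mem ht))
      simp only at h1 h2
      have : m = m' := le_antisymm h1 h2
      rw [this]

/-- once the running minimum is ≤ every remaining range value, the fold keeps it -/
theorem foldl_min_stays (c : Int → Bool) (mn mx s : Int) (hle : ∀ v, mn ≤ v → v < mx → s ≤ v) :
    (PySem.List.pyRange mn mx).foldl
      (fun smallest val => if c val then smallest else if val < smallest then val else smallest) s = s := by
  rcases lt_or_ge mn mx with hlt | hge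
  · rw [PySem.List.pyRange_one_cons hlt, List.foldl_cons]
    have hs : s ≤ mn := hle mn le_rfl hlt
    have hne : ¬ (mn < s) := not_lt.mpr hs
    have hstep : (if c mn then s else if mn < s then mn else s) = s := by
      split_ifs <;> simp_all
    rw [hstep]
    exact foldl_min_stays c (mn + 1) mx s (fun v hv1 hv2 => hle v (by omega) hv2)
  · have : PySem.List.pyRange mn mx = [] := by
      have := @PySem.List.mem_pyRange_one mn mx
      cases hE : PySem.List.pyRange mn mx with
      | nil => rfl
      | cons y ys =>
        have hy : y ∈ PySem.List.pyRange mn mx := by rw [hE]; exact List.mem_cons_self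
        have := PySem.List.mem_pyRange_one.mp hy
        omega
    rw [this]; rfl
termination_by (mx - mn).toNat
decreasing_by omega

/-- A's min-of-missing fold over an ascending range equals B's first-missing search. -/
theorem foldl_min_eq_find (c : Int → Bool) (mn mx s : Int) (hlt : ∀ v, mn ≤ v → v < mx → v < s) :
    (PySem.List.pyRange mn mx).foldl
      (fun smallest val => if c val then smallest else if val < smallest then val else smallest) s
    = ((PySem.List.pyRange mn mx).find? (fun v => !(c v))).getD s := by
  rcases lt_or_ge mn mx with h | hge
  · rw [PySem.List.pyRange_one_cons h, List.foldl_cons, List.find?_cons]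
    cases hc : c mn with
    | true =>
      simp only [Bool.not_true, if_true]
      exact foldl_min_eq_find c (mn + 1) mx s (fun v hv1 hv2 => hlt v (by omega) hv2)
    | false =>
      simp only [Bool.not_false, Option.getD_some]
      have hmns : mn < s := hlt mn le_rfl h
      rw [if_pos hmns]
      exact foldl_min_stays c (mn + 1) mx mn (fun v hv1 hv2 => by omega)
  · have hnil : PySem.List.pyRange mn mx = [] := by
      cases hE : PySem.List.pyRange mn mx with
      | nil => rfl
      | cons y ys =>
        have hy : y ∈ PySem.List.pyRange mn mx := by rw [hE]; exact List.mem_cons_self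
        have := PySem.List.mem_pyRange_one.mp hy
        omega
    rw [hnil]; rfl
termination_by (mx - mn).toNat
decreasing_by omega

/-- the whole tail of both programs, generalized over the two set lists -/
theorem main_aux (joined sums : List Int)
    (hmem : ∀ a, a ∈ joined ↔ a ∈ sums) :
    (match PySem.List.min? joined (fun x => x), PySem.List.max? joined (fun x => x) with
     | some mn, some mx =>
        (PySem.List.pyRange mn mx).foldl
          (fun smallest val =>
            if PySem.Set.contains joined val then smallest
            else if val < smallest then val else smallest)
          (mx + 1)
     | _, _ => (0 : Int))
    = (match PySem.List.min? sums (fun x => x) with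
       | none => (0 : Int)
       | some lo =>
         match PySem.List.max? sums (fun x => x) with
         | none => 0
         | some hi =>
           match (PySem.List.pyRange lo hi).find? (fun v => !(PySem.Set.contains sums v)) with
           | some v => v
           | none => hi + 1) := by
  have hmin := min?_eq_of_mem_iff hmem
  have hmax := max?_eq_of_mem_iff hmem
  rw [← hmin, ← hmax]
  cases hmn : PySem.List.min? joined (fun x => x) with
  | none => rfl
  | some mn =>
    cases hmx : PySem.List.max? joined (fun x => x) with
    | none => rfl
    | some mx =>
      dsimp only
      have hub : ∀ v, mn ≤ v → v < mx → v < mx + 1 := by intro v _ hv; omega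
      rw [foldl_min_eq_find (fun v => PySem.Set.contains joined v) mn mx (mx + 1) hub]
      have hcont : ∀ v, PySem.Set.contains joined v = PySem.Set.contains sums v := by
        intro v
        cases hc : PySem.Set.contains sums v with
        | true =>
          exact (PySem.Set.contains_iff _ _).mpr ((hmem v).mpr ((PySem.Set.contains_iff _ _).mp hc))
        | false =>
          cases hcj : PySem.Set.contains joined v with
          | false => rfl
          | true =>
            have hv : v ∈ sums := (hmem v).mp ((PySem.Set.contains_iff _ _).mp hcj)
            rw [← PySem.Set.contains_iff, hc] at hv; cases hv
      simp only [hcont]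
      cases hf : (PySem.List.pyRange mn mx).find? (fun v => !(PySem.Set.contains sums v)) with
      | none => simp
      | some v => simp

-- ===== VERDICT (by name: the statement is the Claim_ definition above) =====
theorem get_smallest_val_not_sum_and_not_in_list_spec : Claim_equal_get_smallest_val_not_sum_and_not_in_list := by
  intro l _
  unfold Spec_get_smallest_val_not_sum_and_not_in_list
  unfold get_smallest_val_not_sum_and_not_in_list get_smallest_val_not_sum_and_not_in_list_alt
  exact main_aux _ _
    (fun a => (memA_iff_SS l a).trans (memB_iff_SS l a).symm)
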